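-- pv_equiv track=rewrite | github.com/GToidZ/TA-Prog1 | tests/wk5/manage_hotel_posted.py | get_floor_revenue_by_date
-- ===== SOURCE A (Python) =====
-- def count_booked_room_by_date(booking_table, _date):
--     """ From the given booking data from file and specific _date,
--         count and return number of booked room on the given _date
--
--         :param booking_table: booking data from file
--         :param _date: int
--         :return: number of booked rooms on _date
--         >>> count_booked_room_by_date([[1, 1, 'Ann', 21, 23], [2, 3, 'Beth', 22, 24]], 21)
--         1
--         >>> count_booked_room_by_date([[1, 1, 'Ann', 21, 23], [2, 3, 'Beth', 22, 24]], 22)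
--         2
--         >>> count_booked_room_by_date([[1, 1, 'Ann', 21, 23], [2, 3, 'Beth', 22, 24]], 23)
--         1
--     """
--     booked_num = 0
--     for book_data in booking_table:
--         if _date in range(book_data[3], book_data[4]):
--             booked_num += 1
--     return booked_num
--
-- def get_floor_revenue_by_date(booking_table, num_floors, current_date):
--     ''' From the given booking data from file and specific current_date,
--         Return a list of revenue separated by each floor.
--
--         :param booking_table: booking data from file
--         :param num_floors: int
--         :param current_date: int
--         :return: a list of revenue on a current_date but separated by each floor
--         where each room fee costs 2500 Baht per day.
--         >>> get_floor_revenue_by_date([[1, 1, 'Ann', 21, 23], [2, 3, 'Beth', 21, 24]], 2, 21)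
--         [2500, 2500]
--         >>> get_floor_revenue_by_date([[1, 1, 'Ann', 21, 23], [1, 3, 'Beth', 22, 24]], 2, 22)
--         [5000, 0]
--         >>> get_floor_revenue_by_date([[1, 1, 'Ann', 21, 22], [2, 3, 'Beth', 23, 24]], 2, 23)
--         [0, 2500]
--     '''
--     revenue = []
--     for num_floor in range(1, num_floors + 1):
--         book_floor_table = []
--         for book_data in booking_table:
--             if book_data[0] == num_floor:
--                 book_floor_table += [book_data]
--         book_count = count_booked_room_by_date(book_floor_table, current_date)
--         revenue += [book_count * 2500]
--     return revenue
-- ===== SOURCE B (Python) =====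
-- def get_floor_revenue_by_date(booking_table, num_floors, current_date):
--     # Single pass: bucket each booking into a floor-indexed revenue array.
--     revenue = [0] * num_floors
--     for row in booking_table:
--         floor = row[0]
--         if 1 <= floor <= num_floors and row[3] <= current_date < row[4]:
--             revenue[floor - 1] += 2500
--     return revenue
-- ===== Notes on version B (the rewrite author's own statement) =====
-- stated objective: faster
-- what changed: Instead of scanning the whole booking table once per floor (filter by floor, then count dates), B makes one pass over the bookings, bucketing each active booking's 2500 into a floor-indexed revenue array.
-- outside the precondition, e.g. on get_floor_revenue_by_date([[]], 0, 5): A returns [], B raises IndexError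
import Mathlib
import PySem

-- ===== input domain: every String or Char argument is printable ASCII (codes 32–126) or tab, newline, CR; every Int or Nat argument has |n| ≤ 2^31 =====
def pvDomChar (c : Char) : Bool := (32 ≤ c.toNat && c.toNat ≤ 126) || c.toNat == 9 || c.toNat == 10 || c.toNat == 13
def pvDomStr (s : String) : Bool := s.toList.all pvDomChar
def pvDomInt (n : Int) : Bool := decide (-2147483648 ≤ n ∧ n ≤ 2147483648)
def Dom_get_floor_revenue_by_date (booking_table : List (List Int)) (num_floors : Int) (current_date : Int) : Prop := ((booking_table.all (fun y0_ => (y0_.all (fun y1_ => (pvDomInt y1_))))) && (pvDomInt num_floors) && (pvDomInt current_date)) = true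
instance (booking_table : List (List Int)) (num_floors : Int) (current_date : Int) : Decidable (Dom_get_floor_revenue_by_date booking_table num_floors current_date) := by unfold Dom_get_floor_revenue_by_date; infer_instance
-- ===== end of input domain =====

-- B replaces A's per-floor rescans of the booking table by one bucketing pass over the bookings.


-- ===== PORT A =====
def count_booked_room_by_date (booking_table : List (List Int)) (_date : Int) : Int :=
  booking_table.foldl (fun booked_num book_data =>
    if _date ∈ PySem.List.pyRange (PySem.List.pyGetD book_data 3 0) (PySem.List.pyGetD book_data 4 0) 1
    then booked_num + 1 else booked_num) 0

def get_floor_revenue_by_date (booking_table : List (List Int)) (num_floors : Int) (current_date : Int) : List Int :=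
  (PySem.List.pyRange 1 (num_floors + 1) 1).foldl (fun revenue num_floor =>
    revenue ++ [count_booked_room_by_date
      (booking_table.foldl (fun book_floor_table book_data =>
        if PySem.List.pyGetD book_data 0 0 = num_floor
        then book_floor_table ++ [book_data] else book_floor_table) [])
      current_date * 2500]) []

-- ===== PORT B =====
def get_floor_revenue_by_date_alt (booking_table : List (List Int)) (num_floors : Int) (current_date : Int) : List Int :=
  booking_table.foldl (fun revenue row =>
    let floor := PySem.List.pyGetD row 0 0
    if 1 ≤ floor ∧ floor ≤ num_floors ∧
       PySem.List.pyGetD row 3 0 ≤ current_date ∧ current_date < PySem.List.pyGetD row 4 0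
    then PySem.List.pySetD revenue (floor - 1) (PySem.List.pyGetD revenue (floor - 1) 0 + 2500)
    else revenue)
    (List.replicate num_floors.toNat 0)

-- ===== PRECONDITION & SPEC =====
-- Pre_ marks where both Pythons return normally; the ports themselves (total via pyGetD defaults)
-- agree on every input, so the proof below does not need Pre_.
-- Pre_ excludes tables containing a row that is empty or that names an in-range floor with fewer
-- than 5 fields: on such tables one of the two Pythons raises IndexError (A whenever it scans the
-- short row, i.e. whenever num_floors ≥ 1 or the row's floor is in range; B on any empty row).
def Pre_get_floor_revenue_by_date (booking_table : List (List Int)) (num_floors : Int) (current_date : Int) : Prop :=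
  ∀ row ∈ booking_table, row ≠ [] ∧
    (1 ≤ row.getD 0 0 ∧ row.getD 0 0 ≤ num_floors → 5 ≤ row.length)
instance (booking_table : List (List Int)) (num_floors : Int) (current_date : Int) : Decidable (Pre_get_floor_revenue_by_date booking_table num_floors current_date) := by unfold Pre_get_floor_revenue_by_date; infer_instance

def pvWitness_get_floor_revenue_by_date : List (List Int) × Int × Int :=
  ([[1, 1, 7, 21, 23], [2, 3, 8, 22, 24]], 2, 22)

def Spec_get_floor_revenue_by_date (booking_table : List (List Int)) (num_floors : Int) (current_date : Int) (out : List Int) : Prop := out = get_floor_revenue_by_date_alt booking_table num_floors current_date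
instance (booking_table : List (List Int)) (num_floors : Int) (current_date : Int) (out : List Int) : Decidable (Spec_get_floor_revenue_by_date booking_table num_floors current_date out) := by unfold Spec_get_floor_revenue_by_date; infer_instance

-- ===== CLAIM (what is proved, stated in full; the proofs are below) =====
def Claim_equal_get_floor_revenue_by_date : Prop := ∀ (booking_table : List (List Int)) (num_floors : Int) (current_date : Int), Dom_get_floor_revenue_by_date booking_table num_floors current_date → Pre_get_floor_revenue_by_date booking_table num_floors current_date → Spec_get_floor_revenue_by_date booking_table num_floors current_date (get_floor_revenue_by_date booking_table num_floors current_date)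

-- ===== LEMMAS AND PROOFS =====

-- number of bookings of floor `fl` active on date `cd` (the quantity both programs tally)
def pvCnt (bt : List (List Int)) (cd fl : Int) : Int :=
  (bt.countP (fun row =>
    decide (cd ∈ PySem.List.pyRange (PySem.List.pyGetD row 3 0) (PySem.List.pyGetD row 4 0) 1) &&
    decide (PySem.List.pyGetD row 0 0 = fl)) : Int)

lemma pvCnt_cons (row : List Int) (rest : List (List Int)) (cd fl : Int) :
    pvCnt (row :: rest) cd fl =
      pvCnt rest cd fl +
        (if PySem.List.pyGetD row 0 0 = fl ∧
            PySem.List.pyGetD row 3 0 ≤ cd ∧ cd < PySem.List.pyGetD row 4 0 then 1 else 0) := by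
  by_cases h : PySem.List.pyGetD row 0 0 = fl ∧
      PySem.List.pyGetD row 3 0 ≤ cd ∧ cd < PySem.List.pyGetD row 4 0
  · simp [pvCnt, PySem.List.mem_pyRange_one, h.1, h.2.1, h.2.2]
  · rw [if_neg h]
    simp only [pvCnt, List.countP_cons, PySem.List.mem_pyRange_one]
    have : ¬ ((PySem.List.pyGetD row 3 0 ≤ cd ∧ cd < PySem.List.pyGetD row 4 0) ∧
        PySem.List.pyGetD row 0 0 = fl) := by tauto
    simp [this]

lemma pv_set_map_range (n j : Nat) (g : Nat → Int) (v : Int) :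
    ((List.range n).map g).set j v = (List.range n).map (fun k => if k = j then v else g k) := by
  apply List.ext_getElem
  · simp
  · intro i hi hi'
    simp only [List.getElem_set, List.getElem_map, List.getElem_range]
    by_cases h : i = j
    · simp [h]
    · rw [if_neg (Ne.symm h), if_neg h]

-- A's port in closed form: map over the floors of 2500 · pvCnt
lemma pvA_eq (bt : List (List Int)) (nf cd : Int) :
    get_floor_revenue_by_date bt nf cd =
      (List.range nf.toNat).map (fun (k : Nat) => pvCnt bt cd (1 + (k : Int)) * 2500) := by
  unfold get_floor_revenue_by_date
  rw [PySem.List.foldl_append_singleton_eq_map, PySem.List.pyRange_one]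
  have hnf : (nf + 1 - 1).toNat = nf.toNat := by omega
  rw [hnf, List.map_map, List.nil_append]
  apply List.map_congr_left
  intro k _
  simp only [Function.comp_apply]
  rw [PySem.List.foldl_append_ite_eq_filter, List.nil_append]
  unfold count_booked_room_by_date
  rw [PySem.List.foldl_ite_add_one, List.countP_filter, zero_add, pvCnt]

-- B's bucketing pass, with an arbitrary floor-indexed accumulator
lemma pv_hist (nf cd : Int) (bt : List (List Int)) : ∀ (g : Nat → Int),
    bt.foldl (fun revenue row =>
        let floor := PySem.List.pyGetD row 0 0
        if 1 ≤ floor ∧ floor ≤ nf ∧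
           PySem.List.pyGetD row 3 0 ≤ cd ∧ cd < PySem.List.pyGetD row 4 0
        then PySem.List.pySetD revenue (floor - 1) (PySem.List.pyGetD revenue (floor - 1) 0 + 2500)
        else revenue)
      ((List.range nf.toNat).map g)
    = (List.range nf.toNat).map (fun (k : Nat) => g k + pvCnt bt cd (1 + (k : Int)) * 2500) := by
  induction bt with
  | nil => intro g; simp [pvCnt]
  | cons row rest ih =>
    intro g
    simp only [List.foldl_cons]
    by_cases hc : 1 ≤ PySem.List.pyGetD row 0 0 ∧ PySem.List.pyGetD row 0 0 ≤ nf ∧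
        PySem.List.pyGetD row 3 0 ≤ cd ∧ cd < PySem.List.pyGetD row 4 0
    · obtain ⟨h1, h2, h3, h4⟩ := hc
      set f := PySem.List.pyGetD row 0 0 with hf
      have hget : PySem.List.pyGetD ((List.range nf.toNat).map g) (f - 1) 0 = g (f - 1).toNat := by
        rw [PySem.List.pyGetD_eq_getElem _ 0 (by omega) (by simp; omega)]
        simp
      have hset : PySem.List.pySetD ((List.range nf.toNat).map g) (f - 1)
            (PySem.List.pyGetD ((List.range nf.toNat).map g) (f - 1) 0 + 2500)
          = (List.range nf.toNat).map
              (fun k => if k = (f - 1).toNat then g (f - 1).toNat + 2500 else g k) := by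
        rw [PySem.List.pySetD_of_nonneg _ _ (by omega), hget, pv_set_map_range]
      rw [if_pos ⟨h1, h2, h3, h4⟩, hset, ih]
      apply List.map_congr_left
      intro k hk
      simp only [List.mem_range] at hk
      rw [pvCnt_cons]
      by_cases hkf : k = (f - 1).toNat
      · subst hkf
        rw [if_pos rfl, if_pos ⟨by omega, h3, h4⟩]
        ring
      · rw [if_neg hkf, if_neg (by rintro ⟨he, -, -⟩; omega)]
        ring
    · rw [if_neg hc, ih]
      apply List.map_congr_left
      intro k hk
      simp only [List.mem_range] at hk
      rw [pvCnt_cons, if_neg (by rintro ⟨he, hd3, hd4⟩; exact hc ⟨by omega, by omega, hd3, hd4⟩)]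
      ring

lemma pvB_eq (bt : List (List Int)) (nf cd : Int) :
    get_floor_revenue_by_date_alt bt nf cd =
      (List.range nf.toNat).map (fun (k : Nat) => pvCnt bt cd (1 + (k : Int)) * 2500) := by
  unfold get_floor_revenue_by_date_alt
  have hrep : List.replicate nf.toNat (0 : Int) = (List.range nf.toNat).map (fun _ => 0) := by
    simp
  rw [hrep, pv_hist nf cd bt (fun _ => 0)]
  simp

-- ===== VERDICT (by name: the statement is the Claim_ definition above) =====
theorem get_floor_revenue_by_date_spec : Claim_equal_get_floor_revenue_by_date := by
  intro bt nf cd _ _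
  unfold Spec_get_floor_revenue_by_date
  rw [pvA_eq, pvB_eq]
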